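-- pv_equiv track=rewrite | github.com/BrettRey/erdos-problem-993 | diagnose_condC_product_mechanism.py | mode_index
-- ===== SOURCE A (Python) =====
-- def mode_index(poly: list[int]) -> int:
--     """Leftmost mode index."""
--     if not poly:
--         return 0
--     mx = max(poly)
--     for k, v in enumerate(poly):
--         if v == mx:
--             return k
--     return 0
-- ===== SOURCE B (Python) =====
-- def mode_index(poly: list[int]) -> int:
--     """Leftmost mode index, single running-max pass."""
--     best_index = 0
--     best_value = None
--     for k, v in enumerate(poly):
--         if best_value is None or v > best_value:
--             best_value = v
--             best_index = k
--     return best_index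
-- ===== Notes on version B (the rewrite author's own statement) =====
-- stated objective: simpler
-- what changed: Replaces the two passes (max() then a scan for its first index) by one enumerate loop maintaining a running best value and best index, with strict '>' keeping the leftmost maximum; the empty-list guard disappears since best_index starts at 0.
import Mathlib
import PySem

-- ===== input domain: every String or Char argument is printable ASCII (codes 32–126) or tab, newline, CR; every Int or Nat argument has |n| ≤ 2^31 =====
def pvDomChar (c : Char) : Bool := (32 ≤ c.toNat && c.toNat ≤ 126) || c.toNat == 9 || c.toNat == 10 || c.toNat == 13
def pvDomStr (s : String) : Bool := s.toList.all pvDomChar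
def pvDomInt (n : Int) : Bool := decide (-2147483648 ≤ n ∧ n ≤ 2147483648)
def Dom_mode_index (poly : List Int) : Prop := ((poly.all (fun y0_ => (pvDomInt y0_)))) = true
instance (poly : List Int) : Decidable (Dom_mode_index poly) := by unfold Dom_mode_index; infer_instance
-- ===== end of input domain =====

-- B replaces A's two passes (max, then scan for its first index) by one running-max pass; objective: simpler.

-- ===== PORT A =====
-- the 'for k, v in enumerate(poly): if v == mx: return k' loop, index carried explicitly
def mode_index_find (mx : Int) : List Int → Nat → Int
  | [], _ => 0
  | v :: t, k => if v = mx then (k : Int) else mode_index_find mx t (k + 1)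

def mode_index (poly : List Int) : Int :=
  if poly = [] then 0
  else
    match PySem.List.max? poly (fun x => x) with
    | none => 0
    | some mx => mode_index_find mx poly 0

-- ===== PORT B =====
-- the single enumerate loop of Source B: state = (best_index, best_value)
def mode_index_loop : List Int → Nat → Nat → Option Int → Nat × Option Int
  | [], _, bi, bv => (bi, bv)
  | v :: t, k, bi, bv =>
    match bv with
    | none => mode_index_loop t (k + 1) k (some v)
    | some b => if v > b then mode_index_loop t (k + 1) k (some v)
                else mode_index_loop t (k + 1) bi (some b)

def mode_index_alt (poly : List Int) : Int :=
  ((mode_index_loop poly 0 0 none).1 : Int)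

-- ===== PRECONDITION & SPEC =====
def Spec_mode_index (poly : List Int) (out : Int) : Prop := out = mode_index_alt poly
instance (poly : List Int) (out : Int) : Decidable (Spec_mode_index poly out) := by unfold Spec_mode_index; infer_instance

-- ===== CLAIM (what is proved, stated in full; the proofs are below) =====
def Claim_equal_mode_index : Prop := ∀ (poly : List Int), Dom_mode_index poly → Spec_mode_index poly (mode_index poly)

-- ===== LEMMAS AND PROOFS =====

-- B's loop, once the running max is live, lands on A's first-index scan of the suffix
theorem mode_index_loop_spec (t : List Int) : ∀ (k bi : Nat) (bv : Int),
    ((mode_index_loop t k bi (some bv)).1 : Int) =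
      if t.foldl max bv = bv then (bi : Int) else mode_index_find (t.foldl max bv) t k := by
  induction t with
  | nil => intro k bi bv; simp [mode_index_loop]
  | cons v t ih =>
    intro k bi bv
    by_cases hv : v > bv
    · have hmax : max bv v = v := by omega
      rw [show mode_index_loop (v :: t) k bi (some bv) = mode_index_loop t (k+1) k (some v) by
        simp [mode_index_loop, hv]]
      rw [ih (k+1) k v]
      have hle : v ≤ t.foldl max v := (PySem.List.le_foldl_max t v).1
      simp only [List.foldl, hmax, mode_index_find]
      have hne : ¬ (t.foldl max v = bv) := by omega
      rw [if_neg hne]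
      by_cases hx : t.foldl max v = v
      · simp [hx]
      · have hne2 : ¬ (v = t.foldl max v) := fun h => hx h.symm
        simp [hx, hne2]
    · have hmax : max bv v = bv := by omega
      rw [show mode_index_loop (v :: t) k bi (some bv) = mode_index_loop t (k+1) bi (some bv) by
        simp [mode_index_loop, hv]]
      rw [ih (k+1) bi bv]
      simp only [List.foldl, hmax]
      by_cases hx : t.foldl max bv = bv
      · simp [hx]
      · have hgt : bv < t.foldl max bv := lt_of_le_of_ne (PySem.List.le_foldl_max t bv).1 (Ne.symm hx)
        have : ¬ (v = t.foldl max bv) := by omega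
        simp [hx, mode_index_find, this]

theorem mode_index_eq_alt (poly : List Int) : mode_index poly = mode_index_alt poly := by
  cases poly with
  | nil => simp [mode_index, mode_index_alt, mode_index_loop]
  | cons x t =>
    rw [show mode_index_alt (x :: t) = ((mode_index_loop t 1 0 (some x)).1 : Int) by
      simp [mode_index_alt, mode_index_loop]]
    rw [mode_index_loop_spec t 1 0 x]
    simp only [mode_index, if_neg (List.cons_ne_nil x t), PySem.List.max?_id_cons]
    by_cases hx : t.foldl max x = x
    · simp [hx, mode_index_find]
    · have : ¬ (x = t.foldl max x) := fun h => hx h.symm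
      simp [hx, mode_index_find, this]

-- ===== VERDICT (by name: the statement is the Claim_ definition above) =====
theorem mode_index_spec : Claim_equal_mode_index := by
  intro poly _
  unfold Spec_mode_index
  exact mode_index_eq_alt poly
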